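-- pv_equiv track=rewrite | github.com/kamekingdom/at-coder | abc354/f2.py | min_toll_fee
-- ===== SOURCE A (Python) =====
-- def min_toll_fee(K, Sx, Sy, Tx, Ty):
--     # Calculate how the tile type changes along the path
--     def count_changes(pos1, pos2, orthogonal_pos, K):
--         # Determine the number of changes along one axis, considering the orthogonal axis position
--         if pos1 > pos2:
--             pos1, pos2 = pos2, pos1  # Ensure start is always less than end
--
--         # Calculate the initial and final tile types
--         initial_tile = ((pos1 // K) + (orthogonal_pos // K)) % 2
--         final_tile = ((pos2 // K) + (orthogonal_pos // K)) % 2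
--
--         # Count the boundary crossings that result in a change of tile type
--         changes = 0
--         current_tile = initial_tile
--         for pos in range(pos1, pos2 + 1):
--             new_tile = ((pos // K) + (orthogonal_pos // K)) % 2
--             if pos % K == 0 and new_tile != current_tile:
--                 changes += 1
--                 current_tile = new_tile
--
--         return changes
--
--     # Calculate the number of tile type changes in the horizontal and vertical directions
--     horizontal_changes = count_changes(Sx, Tx, Sy, K)
--     vertical_changes = count_changes(Sy, Ty, Sx, K)
--
--     return horizontal_changes + vertical_changes
-- ===== SOURCE B (Python) =====
-- def min_toll_fee(K, Sx, Sy, Tx, Ty):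
--     # Closed form: crossings per axis = difference of floor-divided coordinates.
--     return abs(Tx // K - Sx // K) + abs(Ty // K - Sy // K)
-- ===== Notes on version B (the rewrite author's own statement) =====
-- stated objective: faster
-- what changed: Replaces the per-unit scan of every integer position between the endpoints with the closed form |Tx//K - Sx//K| + |Ty//K - Sy//K| (crossings counted by floor division), O(1) instead of O(|Tx-Sx|+|Ty-Sy|).
-- outside the precondition, e.g. on min_toll_fee(-3, -2, 13, 0, -9): A returns 7, B returns 8
import Mathlib
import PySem

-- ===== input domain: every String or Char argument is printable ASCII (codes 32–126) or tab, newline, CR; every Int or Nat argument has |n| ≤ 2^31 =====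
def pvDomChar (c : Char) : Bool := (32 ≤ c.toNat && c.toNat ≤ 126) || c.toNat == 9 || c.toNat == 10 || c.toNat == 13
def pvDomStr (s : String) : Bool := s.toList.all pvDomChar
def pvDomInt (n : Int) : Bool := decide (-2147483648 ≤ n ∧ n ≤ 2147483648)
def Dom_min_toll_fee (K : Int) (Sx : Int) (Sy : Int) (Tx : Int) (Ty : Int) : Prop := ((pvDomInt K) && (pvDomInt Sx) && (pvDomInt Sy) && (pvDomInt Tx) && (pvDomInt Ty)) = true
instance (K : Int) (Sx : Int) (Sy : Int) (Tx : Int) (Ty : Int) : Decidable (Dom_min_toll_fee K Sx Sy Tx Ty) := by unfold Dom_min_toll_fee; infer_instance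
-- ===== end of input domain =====

-- B replaces A's unit-step scan of every position between the endpoints with the
-- closed form |Tx//K - Sx//K| + |Ty//K - Sy//K| (objective: faster, O(1) per axis).

-- ===== PORT A =====
-- literal port of A's inner helper count_changes (the `_final_tile` binding mirrors
-- Python's unused `final_tile` variable)
def countChangesA (pos1 pos2 orthogonal_pos K : Int) : Int :=
  -- Python raises ZeroDivisionError at the first floordiv when K = 0 (outside Pre_);
  -- this guard only totalizes the port without scanning the range there
  if K = 0 then 0 else
  let p := if pos1 > pos2 then (pos2, pos1) else (pos1, pos2)
  let lo := p.1
  let hi := p.2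
  let initial_tile := PySem.Int.mod (PySem.Int.floordiv lo K + PySem.Int.floordiv orthogonal_pos K) 2
  let _final_tile := PySem.Int.mod (PySem.Int.floordiv hi K + PySem.Int.floordiv orthogonal_pos K) 2
  let r := (PySem.List.pyRange lo (hi + 1) 1).foldl
      (fun (st : Int × Int) pos =>
        let new_tile := PySem.Int.mod (PySem.Int.floordiv pos K + PySem.Int.floordiv orthogonal_pos K) 2
        if PySem.Int.mod pos K = 0 ∧ new_tile ≠ st.2 then (st.1 + 1, new_tile) else st)
      (0, initial_tile)
  r.1

def min_toll_fee (K : Int) (Sx : Int) (Sy : Int) (Tx : Int) (Ty : Int) : Int :=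
  countChangesA Sx Tx Sy K + countChangesA Sy Ty Sx K

-- ===== PORT B =====
def min_toll_fee_alt (K : Int) (Sx : Int) (Sy : Int) (Tx : Int) (Ty : Int) : Int :=
  |PySem.Int.floordiv Tx K - PySem.Int.floordiv Sx K| +
  |PySem.Int.floordiv Ty K - PySem.Int.floordiv Sy K|

-- ===== PRECONDITION & SPEC =====
-- Pre_ restricts to the task's natural domain K ≥ 1 (K is a tile size): K = 0 makes A
-- raise ZeroDivisionError, and for negative K the value A returns is an artefact of its
-- scan testing boundaries only at pos % K == 0 while the tile changes elsewhere, which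
-- B does not reproduce.
def Pre_min_toll_fee (K : Int) (Sx : Int) (Sy : Int) (Tx : Int) (Ty : Int) : Prop := 1 ≤ K
instance (K : Int) (Sx : Int) (Sy : Int) (Tx : Int) (Ty : Int) : Decidable (Pre_min_toll_fee K Sx Sy Tx Ty) := by unfold Pre_min_toll_fee; infer_instance
def pvWitness_min_toll_fee : Int × Int × Int × Int × Int := (2, 0, 0, 5, 3)

def Spec_min_toll_fee (K : Int) (Sx : Int) (Sy : Int) (Tx : Int) (Ty : Int) (out : Int) : Prop := out = min_toll_fee_alt K Sx Sy Tx Ty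
instance (K : Int) (Sx : Int) (Sy : Int) (Tx : Int) (Ty : Int) (out : Int) : Decidable (Spec_min_toll_fee K Sx Sy Tx Ty out) := by unfold Spec_min_toll_fee; infer_instance

-- ===== CLAIM (what is proved, stated in full; the proofs are below) =====
def Claim_equal_min_toll_fee : Prop := ∀ (K : Int) (Sx : Int) (Sy : Int) (Tx : Int) (Ty : Int), Dom_min_toll_fee K Sx Sy Tx Ty → Pre_min_toll_fee K Sx Sy Tx Ty → Spec_min_toll_fee K Sx Sy Tx Ty (min_toll_fee K Sx Sy Tx Ty)

-- ===== LEMMAS AND PROOFS =====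

-- step facts about ediv for positive divisor
theorem pv_ediv_succ_of_dvd {K p : Int} (hK : 0 < K) (h : K ∣ (p + 1)) :
    (p + 1) / K = p / K + 1 := by
  obtain ⟨m, hm⟩ := h
  have hm' : p + 1 = m * K := by rw [hm]; ring
  have h1 : (p + 1) / K = m := by rw [hm]; exact Int.mul_ediv_cancel_left m (by omega)
  have hp : p = (K - 1) + (m - 1) * K := by rw [sub_mul, one_mul]; omega
  have h2 : p / K = (K - 1) / K + (m - 1) := by rw [hp]; exact Int.add_mul_ediv_right _ _ (by omega)
  have h3 : (K - 1) / K = 0 := Int.ediv_eq_zero_of_lt (by omega) (by omega)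
  omega

theorem pv_ediv_succ_of_not_dvd {K p : Int} (hK : 0 < K) (h : ¬ K ∣ (p + 1)) :
    (p + 1) / K = p / K := by
  have hmod := Int.emod_add_mul_ediv p K
  have hcomm : K * (p / K) = (p / K) * K := mul_comm _ _
  have hb1 : 0 ≤ p % K := Int.emod_nonneg p (by omega)
  have hb2 : p % K < K := Int.emod_lt_of_pos p hK
  by_cases hr : p % K + 1 = K
  · exfalso; apply h; exact ⟨p / K + 1, by rw [mul_add, mul_one]; omega⟩
  · have hp : p + 1 = (p % K + 1) + (p / K) * K := by omega
    have h2 : (p + 1) / K = (p % K + 1) / K + p / K := by rw [hp]; exact Int.add_mul_ediv_right _ _ (by omega)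
    have h3 : (p % K + 1) / K = 0 := Int.ediv_eq_zero_of_lt (by omega) (by omega)
    omega

theorem pv_mod2_ne (a q : Int) : PySem.Int.mod (a + 1 + q) 2 ≠ PySem.Int.mod (a + q) 2 := by
  rw [PySem.Int.mod_eq_emod_of_pos (by norm_num : (0:Int) < 2), PySem.Int.mod_eq_emod_of_pos (by norm_num : (0:Int) < 2)]
  omega

-- loop invariant: scanning [p1, p1+n] yields (⌊(p1+n)/K⌋ - ⌊p1/K⌋, tile(p1+n))
theorem pvA_loop (K q p1 : Int) (hK : 0 < K) (n : Nat) :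
    (PySem.List.pyRange p1 (p1 + n + 1) 1).foldl
      (fun (st : Int × Int) pos =>
        let new_tile := PySem.Int.mod (PySem.Int.floordiv pos K + q) 2
        if PySem.Int.mod pos K = 0 ∧ new_tile ≠ st.2 then (st.1 + 1, new_tile) else st)
      (0, PySem.Int.mod (PySem.Int.floordiv p1 K + q) 2)
    = (PySem.Int.floordiv (p1 + n) K - PySem.Int.floordiv p1 K,
       PySem.Int.mod (PySem.Int.floordiv (p1 + n) K + q) 2) := by
  induction n with
  | zero =>
      simp only [Nat.cast_zero, add_zero, sub_self]
      rw [PySem.List.pyRange_one_singleton]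
      simp
  | succ n ih =>
      have hc : p1 + ((n + 1 : Nat) : Int) = (p1 + n) + 1 := by push_cast; ring
      rw [hc]
      have hsplit : PySem.List.pyRange p1 ((p1 + (n : Int) + 1) + 1) 1
          = PySem.List.pyRange p1 (p1 + (n : Int) + 1) 1 ++ [p1 + (n : Int) + 1] := by
        exact PySem.List.pyRange_one_succ_right (by omega : p1 ≤ p1 + (n : Int) + 1)
      rw [hsplit, List.foldl_append, ih]
      simp only [List.foldl]
      by_cases hd : PySem.Int.mod (p1 + n + 1) K = 0
      · have hdvd : K ∣ (p1 + n + 1) := (PySem.Int.mod_eq_zero_iff_dvd _ _).mp hd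
        have hstep : PySem.Int.floordiv (p1 + n + 1) K = PySem.Int.floordiv (p1 + n) K + 1 := by
          rw [PySem.Int.floordiv_eq_ediv_of_pos hK, PySem.Int.floordiv_eq_ediv_of_pos hK]
          exact pv_ediv_succ_of_dvd hK hdvd
        have hne : PySem.Int.mod (PySem.Int.floordiv (p1 + n + 1) K + q) 2
            ≠ PySem.Int.mod (PySem.Int.floordiv (p1 + n) K + q) 2 := by
          rw [hstep]; exact pv_mod2_ne _ q
        rw [if_pos ⟨hd, hne⟩]
        refine Prod.ext ?_ rfl
        simp only [hstep]; ring
      · have hnd : ¬ K ∣ (p1 + n + 1) := fun h => hd ((PySem.Int.mod_eq_zero_iff_dvd _ _).mpr h)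
        have hstep : PySem.Int.floordiv (p1 + n + 1) K = PySem.Int.floordiv (p1 + n) K := by
          rw [PySem.Int.floordiv_eq_ediv_of_pos hK, PySem.Int.floordiv_eq_ediv_of_pos hK]
          exact pv_ediv_succ_of_not_dvd hK hnd
        rw [if_neg (by intro h; exact hd h.1)]
        rw [hstep]

theorem pvA_axis (K a b o : Int) (hK : 0 < K) :
    countChangesA a b o K = |PySem.Int.floordiv b K - PySem.Int.floordiv a K| := by
  have hmono : ∀ x y : Int, x ≤ y → PySem.Int.floordiv x K ≤ PySem.Int.floordiv y K := by
    intro x y hxy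
    rw [PySem.Int.floordiv_eq_ediv_of_pos hK, PySem.Int.floordiv_eq_ediv_of_pos hK]
    exact Int.ediv_le_ediv hK hxy
  unfold countChangesA
  rw [if_neg (by omega : ¬ K = 0)]
  by_cases hab : a > b
  · rw [if_pos hab]
    have hn : a = b + ((a - b).toNat : Int) := by omega
    have := pvA_loop K (PySem.Int.floordiv o K) b hK (a - b).toNat
    simp only []
    rw [show a + 1 = b + ((a - b).toNat : Int) + 1 by omega, this]
    have h1 := hmono b a (by omega)
    rw [abs_of_nonpos (by omega), ← hn]
    ring
  · rw [if_neg hab]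
    have hn : b = a + ((b - a).toNat : Int) := by omega
    have := pvA_loop K (PySem.Int.floordiv o K) a hK (b - a).toNat
    simp only []
    rw [show b + 1 = a + ((b - a).toNat : Int) + 1 by omega, this]
    have h1 := hmono a b (by omega)
    rw [abs_of_nonneg (by omega), ← hn]

-- ===== VERDICT (by name: the statement is the Claim_ definition above) =====
theorem min_toll_fee_spec : Claim_equal_min_toll_fee := by
  intro K Sx Sy Tx Ty _ hPre
  unfold Spec_min_toll_fee min_toll_fee min_toll_fee_alt
  rw [pvA_axis K Sx Tx Sy hPre, pvA_axis K Sy Ty Sx hPre]
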